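-- pv_equiv track=rewrite | github.com/nugumanov03/pyt-2att | homeworks/hw6/a.py | square_free_numbers
-- ===== SOURCE A (Python) =====
-- import math
-- from itertools import combinations
--
-- def square_free_numbers(primes, max_value):
--     square_free = set()
--     for r in range(1, len(primes) + 1):
--         for combo in combinations(primes, r):
--             product = math.prod(combo)
--             if product <= max_value:
--                 square_free.add(product)
--     return sorted(square_free)
-- ===== SOURCE B (Python) =====
-- def square_free_numbers(primes, max_value):
--     prods = set()
--     for x in primes:
--         prods |= {x * p for p in prods} | {x}
--     return sorted(p for p in prods if p <= max_value)
-- ===== Notes on version B (the rewrite author's own statement) =====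
-- stated objective: alternative
-- what changed: Replaces the double loop over itertools.combinations(primes, r) for every r (recomputing each subset product from scratch with math.prod) by a single left-to-right fold that extends the set of subset products incrementally, multiplying each new element into every product seen so far, then filters by max_value and sorts.
import Mathlib
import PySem

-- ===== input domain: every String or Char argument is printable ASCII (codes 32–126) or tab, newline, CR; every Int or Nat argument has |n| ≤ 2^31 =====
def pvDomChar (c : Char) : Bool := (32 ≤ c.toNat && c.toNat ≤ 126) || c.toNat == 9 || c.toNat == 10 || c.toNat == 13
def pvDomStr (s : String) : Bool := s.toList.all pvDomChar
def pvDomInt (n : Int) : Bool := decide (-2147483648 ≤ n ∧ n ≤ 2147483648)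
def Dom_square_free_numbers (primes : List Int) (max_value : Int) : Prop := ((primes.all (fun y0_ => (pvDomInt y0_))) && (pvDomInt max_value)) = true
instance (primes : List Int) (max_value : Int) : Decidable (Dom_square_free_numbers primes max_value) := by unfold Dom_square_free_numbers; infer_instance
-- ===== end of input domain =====

-- B (alternative): one left-to-right fold building the set of all nonempty subset products
-- (each element combined with every product seen so far), then filter and sort — instead of
-- A's double loop over itertools.combinations(primes, r) recomputing each product from scratch.

-- ===== PORT A =====
-- itertools.combinations(xs, r) in Python's yield order (increasing index tuples)
def pyCombos : List Int → Nat → List (List Int)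
  | _, 0 => [[]]
  | [], _ + 1 => []
  | x :: xs, r + 1 => (pyCombos xs r).map (fun c => x :: c) ++ pyCombos xs (r + 1)

def square_free_numbers (primes : List Int) (max_value : Int) : List Int :=
  -- for r in range(1, len(primes)+1): for combo in combinations(primes, r): …
  let square_free : PySem.Set Int :=
    (PySem.List.pyRange 1 (PySem.List.len primes + 1) 1).foldl (fun s r =>
      (pyCombos primes r.toNat).foldl (fun s combo =>
        let product := combo.foldl (· * ·) 1          -- math.prod(combo)
        if product ≤ max_value then PySem.Set.add s product else s) s)
      PySem.Set.empty
  PySem.List.sorted square_free (fun p => p) false    -- sorted(square_free)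

-- ===== PORT B =====
def square_free_numbers_alt (primes : List Int) (max_value : Int) : List Int :=
  -- prods = set(); for x in primes: prods |= {x * p for p in prods} | {x}
  let prods : PySem.Set Int :=
    primes.foldl (fun s x =>
      PySem.Set.union s (PySem.Set.union (PySem.Set.ofList (s.map (fun p => x * p))) [x])) PySem.Set.empty
  PySem.List.sorted (prods.filter (fun p => decide (p ≤ max_value))) (fun p => p) false

-- ===== PRECONDITION & SPEC =====
def Spec_square_free_numbers (primes : List Int) (max_value : Int) (out : List Int) : Prop := out = square_free_numbers_alt primes max_value
instance (primes : List Int) (max_value : Int) (out : List Int) : Decidable (Spec_square_free_numbers primes max_value out) := by unfold Spec_square_free_numbers; infer_instance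

-- ===== CLAIM (what is proved, stated in full; the proofs are below) =====
def Claim_equal_square_free_numbers : Prop := ∀ (primes : List Int) (max_value : Int), Dom_square_free_numbers primes max_value → Spec_square_free_numbers primes max_value (square_free_numbers primes max_value)

-- ===== LEMMAS AND PROOFS =====

-- a ∈ foldl step, when each step adds exactly the elements satisfying Q
theorem pv_mem_foldl_step {β : Type} (step : List Int → β → List Int) (Q : β → Prop) (a : Int)
    (h : ∀ s x, a ∈ step s x ↔ a ∈ s ∨ Q x) :
    ∀ (l : List β) (s0 : List Int), a ∈ l.foldl step s0 ↔ a ∈ s0 ∨ ∃ x ∈ l, Q x := by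
  intro l
  induction l with
  | nil => intro s0; simp
  | cons x xs ih =>
    intro s0
    simp only [List.foldl_cons, ih, h, List.mem_cons]
    constructor
    · rintro ((hs | hq) | ⟨y, hy, hQ⟩)
      · exact Or.inl hs
      · exact Or.inr ⟨x, Or.inl rfl, hq⟩
      · exact Or.inr ⟨y, Or.inr hy, hQ⟩
    · rintro (hs | ⟨y, (rfl | hy), hQ⟩)
      · exact Or.inl (Or.inl hs)
      · exact Or.inl (Or.inr hQ)
      · exact Or.inr ⟨y, hy, hQ⟩

theorem pv_mem_pyCombos (c : List Int) : ∀ (xs : List Int) (r : Nat),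
    c ∈ pyCombos xs r ↔ c.Sublist xs ∧ c.length = r := by
  intro xs
  induction xs generalizing c with
  | nil =>
    intro r
    cases r with
    | zero => simp [pyCombos, List.sublist_nil]
    | succ n =>
      simp only [pyCombos, List.not_mem_nil, false_iff, not_and]
      intro hs
      simp [List.sublist_nil.mp hs]
  | cons x xs ih =>
    intro r
    cases r with
    | zero =>
      constructor
      · intro h; simp [pyCombos] at h; simp [h]
      · rintro ⟨hs, hl⟩
        rw [List.length_eq_zero_iff] at hl
        simp [pyCombos, hl]
    | succ n =>
      simp only [pyCombos, List.mem_append, List.mem_map]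
      constructor
      · rintro (⟨c', hc', rfl⟩ | hc)
        · obtain ⟨hs, hl⟩ := (ih c' n).mp hc'
          exact ⟨List.Sublist.cons₂ x hs, by simp [hl]⟩
        · obtain ⟨hs, hl⟩ := (ih c (n+1)).mp hc
          exact ⟨hs.cons x, hl⟩
      · rintro ⟨hs, hl⟩
        cases hs with
        | cons _ hs' => exact Or.inr ((ih c (n+1)).mpr ⟨hs', hl⟩)
        | cons₂ _ hs' =>
          rename_i c'
          exact Or.inl ⟨c', (ih c' n).mpr ⟨hs', by simpa using hl⟩, rfl⟩

-- nonempty-subset-product predicate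
def pvNSP (xs : List Int) (a : Int) : Prop := ∃ c, c.Sublist xs ∧ c ≠ [] ∧ c.prod = a

-- membership in A's set
theorem pv_mem_A (primes : List Int) (max_value a : Int) :
    (a ∈ (PySem.List.pyRange 1 (PySem.List.len primes + 1) 1).foldl (fun s r =>
        (pyCombos primes r.toNat).foldl (fun s combo =>
          let product := combo.foldl (· * ·) 1
          if product ≤ max_value then PySem.Set.add s product else s) s)
      PySem.Set.empty) ↔ (pvNSP primes a ∧ a ≤ max_value) := by
  rw [pv_mem_foldl_step _ (fun r : Int => ∃ c ∈ pyCombos primes r.toNat,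
        c.foldl (· * ·) 1 ≤ max_value ∧ a = c.foldl (· * ·) 1) a ?_]
  · simp only [PySem.Set.empty, List.not_mem_nil, false_or]
    constructor
    · rintro ⟨r, hr, c, hc, hle, rfl⟩
      obtain ⟨hs, hl⟩ := (pv_mem_pyCombos c primes r.toNat).mp hc
      rw [PySem.List.mem_pyRange_one] at hr
      refine ⟨⟨c, hs, ?_, List.prod_eq_foldl⟩, hle⟩
      intro h
      subst h
      simp at hl
      omega
    · rintro ⟨⟨c, hs, hne, rfl⟩, hle⟩
      refine ⟨(c.length : Int), ?_, c, ?_, ?_, List.prod_eq_foldl⟩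
      · rw [PySem.List.mem_pyRange_one]
        have h1 := List.Sublist.length_le hs
        have h2 : 0 < c.length := List.length_pos_iff.mpr hne
        simp only [PySem.List.len_eq]
        omega
      · exact (pv_mem_pyCombos c primes c.length).mpr ⟨hs, by simp⟩
      · rw [← List.prod_eq_foldl]; exact hle
  · intro s r
    rw [pv_mem_foldl_step _ (fun c : List Int =>
          c.foldl (· * ·) 1 ≤ max_value ∧ a = c.foldl (· * ·) 1) a ?_]
    intro s' c
    simp only []
    split_ifs with h
    · rw [PySem.Set.mem_add]
      constructor
      · rintro (hs | rfl)
        · exact Or.inl hs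
        · exact Or.inr ⟨h, rfl⟩
      · rintro (hs | ⟨_, rfl⟩)
        · exact Or.inl hs
        · exact Or.inr rfl
    · constructor
      · exact Or.inl
      · rintro (hs | ⟨hle, rfl⟩)
        · exact hs
        · exact absurd hle h

-- membership in B's set
theorem pv_mem_B (primes : List Int) (a : Int) :
    ∀ s0 : List Int,
    (a ∈ primes.foldl (fun s x =>
        PySem.Set.union s (PySem.Set.union (PySem.Set.ofList (s.map (fun p => x * p))) [x])) s0) ↔
      (a ∈ s0 ∨ ∃ c, c.Sublist primes ∧ c ≠ [] ∧ (c.prod = a ∨ ∃ p ∈ s0, c.prod * p = a)) := by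
  induction primes with
  | nil => simp [List.sublist_nil]
  | cons x xs ih =>
    intro s0
    rw [List.foldl_cons, ih]
    have hs1 : ∀ b : Int, b ∈ PySem.Set.union s0 (PySem.Set.union (PySem.Set.ofList (s0.map (fun p => x * p))) [x]) ↔
        (b ∈ s0 ∨ (∃ p ∈ s0, x * p = b) ∨ b = x) := by
      intro b
      simp [PySem.Set.mem_union, PySem.Set.mem_ofList]
    constructor
    · rintro (h1 | ⟨c, hc, hne, h⟩)
      · rw [hs1] at h1
        rcases h1 with h0 | ⟨p, hp, rfl⟩ | hax
        · exact Or.inl h0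
        · exact Or.inr ⟨[x], by simp, by simp, Or.inr ⟨p, hp, by simp⟩⟩
        · exact Or.inr ⟨[x], by simp, by simp, Or.inl (by simpa using hax.symm)⟩
      · rcases h with rfl | ⟨p, hp, rfl⟩
        · exact Or.inr ⟨c, hc.cons x, hne, Or.inl rfl⟩
        · rw [hs1] at hp
          rcases hp with h0 | ⟨q, hq, rfl⟩ | hpx
          · exact Or.inr ⟨c, hc.cons x, hne, Or.inr ⟨p, h0, rfl⟩⟩
          · exact Or.inr ⟨x :: c, hc.cons₂ x, by simp, Or.inr ⟨q, hq, by rw [List.prod_cons]; ring⟩⟩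
          · exact Or.inr ⟨x :: c, hc.cons₂ x, by simp, Or.inl (by rw [List.prod_cons, hpx]; ring)⟩
    · rintro (h0 | ⟨c, hc, hne, h⟩)
      · exact Or.inl ((hs1 a).mpr (Or.inl h0))
      · cases hc with
        | cons _ hc' =>
          refine Or.inr ⟨c, hc', hne, ?_⟩
          rcases h with rfl | ⟨p, hp, rfl⟩
          · exact Or.inl rfl
          · exact Or.inr ⟨p, (hs1 p).mpr (Or.inl hp), rfl⟩
        | cons₂ _ hc' =>
          rename_i c'
          rcases List.eq_nil_or_concat' c' with rfl | _
          · -- c = [x]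
            rcases h with rfl | ⟨p, hp, rfl⟩
            · exact Or.inl ((hs1 (List.prod [x])).mpr (Or.inr (Or.inr (by simp))))
            · exact Or.inl ((hs1 _).mpr (Or.inr (Or.inl ⟨p, hp, by simp⟩)))
          · have hne' : c' ≠ [] := by
              rename_i hcc
              obtain ⟨l, b, rfl⟩ := hcc
              simp
            refine Or.inr ⟨c', hc', hne', ?_⟩
            rcases h with rfl | ⟨p, hp, rfl⟩
            · exact Or.inr ⟨x, (hs1 x).mpr (Or.inr (Or.inr rfl)), by rw [List.prod_cons]; ring⟩
            · exact Or.inr ⟨x * p, (hs1 (x*p)).mpr (Or.inr (Or.inl ⟨p, hp, rfl⟩)), by rw [List.prod_cons]; ring⟩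

-- Nodup is preserved through any fold whose step preserves it
theorem pv_nodup_foldl {β : Type} (step : List Int → β → List Int)
    (h : ∀ s x, s.Nodup → (step s x).Nodup) :
    ∀ (l : List β) (s0 : List Int), s0.Nodup → (l.foldl step s0).Nodup := by
  intro l
  induction l with
  | nil => intro s0 h0; simpa using h0
  | cons x xs ih => intro s0 h0; exact ih (step s0 x) (h s0 x h0)

-- nodup of A's set
theorem pv_nodup_A (primes : List Int) (max_value : Int) :
    ((PySem.List.pyRange 1 (PySem.List.len primes + 1) 1).foldl (fun s r =>
        (pyCombos primes r.toNat).foldl (fun s combo =>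
          let product := combo.foldl (· * ·) 1
          if product ≤ max_value then PySem.Set.add s product else s) s)
      PySem.Set.empty).Nodup := by
  apply pv_nodup_foldl _ ?_ _ _ (by simp [PySem.Set.empty])
  intro s r hs
  apply pv_nodup_foldl _ ?_ _ _ hs
  intro s' c hs'
  simp only []
  split_ifs
  · exact PySem.Set.nodup_add _ _ hs'
  · exact hs'

theorem pv_nodup_B (primes : List Int) :
    (primes.foldl (fun s x =>
        PySem.Set.union s (PySem.Set.union (PySem.Set.ofList (s.map (fun p => x * p))) [x])) PySem.Set.empty).Nodup := by
  apply pv_nodup_foldl _ ?_ _ _ (by simp [PySem.Set.empty])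
  intro s x hs
  exact PySem.Set.nodup_union _ _ hs

-- ===== VERDICT (by name: the statement is the Claim_ definition above) =====
theorem square_free_numbers_spec : Claim_equal_square_free_numbers := by
  intro primes max_value _
  unfold Spec_square_free_numbers square_free_numbers square_free_numbers_alt
  apply PySem.List.sorted_eq_sorted_of_perm _ _ _ (fun a b h => h)
  apply (List.perm_ext_iff_of_nodup (pv_nodup_A primes max_value) ((pv_nodup_B primes).filter _)).mpr
  intro a
  rw [pv_mem_A primes max_value a, List.mem_filter]
  rw [pv_mem_B primes a PySem.Set.empty]
  simp only [PySem.Set.empty, List.not_mem_nil, false_or, List.not_mem_nil, false_and, exists_false, or_false, decide_eq_true_eq]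
  unfold pvNSP
  tauto
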